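-- pv_equiv track=rewrite | github.com/Mark90/my-adventofcode-2019-py | day4/solution.py | part1_check
-- ===== SOURCE A (Python) =====
-- def part1_check(string):
--     repetition = False
--     for i in range(5):
--         if string[i] > string[i + 1]:
--             return False
--         if string[i] == string[i + 1]:
--             repetition = True
--     return repetition
-- ===== SOURCE B (Python) =====
-- def part1_check(string):
--     window = string[:6]
--     return sorted(window) == list(window) and len(set(window)) < len(window)
-- ===== Notes on version B (the rewrite author's own statement) =====
-- stated objective: simpler
-- what changed: Replaces A's index loop with early return and a repetition flag by a declarative check on the 6-char window: it is non-decreasing iff it equals its own sorted copy, and has an adjacent repeated pair iff (being sorted) it contains any duplicate, tested by set cardinality.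
import Mathlib
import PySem

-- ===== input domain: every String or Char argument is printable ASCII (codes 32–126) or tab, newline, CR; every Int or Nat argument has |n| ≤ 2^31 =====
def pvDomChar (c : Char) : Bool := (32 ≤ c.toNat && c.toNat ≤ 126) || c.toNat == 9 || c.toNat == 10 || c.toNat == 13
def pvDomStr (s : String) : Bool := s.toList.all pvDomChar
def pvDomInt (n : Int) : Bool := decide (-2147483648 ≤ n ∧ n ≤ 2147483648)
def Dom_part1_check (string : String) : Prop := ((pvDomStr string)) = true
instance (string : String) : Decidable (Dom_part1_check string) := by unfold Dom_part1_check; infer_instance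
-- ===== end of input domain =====

-- B replaces A's index loop (early return on a descent + repetition flag) by a declarative check on the
-- 6-char window: equal to its sorted copy (non-decreasing) and set cardinality below length (a duplicate,
-- which in a sorted window is an adjacent pair); return values proved equal wherever A returns.


-- ===== PORT A =====
-- for i in range(5): early return False on a descent, set the repetition flag on an equal pair
def part1_checkLoop (l : List Char) : List Int → Bool → Bool
  | [], rep => rep
  | i :: rest, rep =>
    match PySem.List.pyGet? l i, PySem.List.pyGet? l (i + 1) with
    | some a, some b =>
      if a > b then false
      else part1_checkLoop l rest (if a == b then true else rep)
    | _, _ => false  -- IndexError (string[i] or string[i+1] out of range): outside Pre_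

def part1_check (string : String) : Bool :=
  part1_checkLoop string.toList (PySem.List.pyRange 0 5 1) false

-- ===== PORT B =====
-- window = string[:6]; return sorted(window) == list(window) and len(set(window)) < len(window)
def part1_check_alt (string : String) : Bool :=
  let window := PySem.List.slice string.toList none (some 6)
  (PySem.List.sorted window (fun x => x) == window) &&
    decide ((PySem.Set.ofList window).length < window.length)

-- ===== PRECONDITION & SPEC =====
-- A raises IndexError exactly on strings shorter than 6 whose characters are non-decreasing
-- (the loop then reaches an out-of-range index before any early return); Pre_ excludes exactly those.
def Pre_part1_check (string : String) : Prop :=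
  6 ≤ string.toList.length ∨ ¬ List.IsChain (· ≤ ·) string.toList
instance (string : String) : Decidable (Pre_part1_check string) := by unfold Pre_part1_check; infer_instance
def pvWitness_part1_check : String := "112345"

def Spec_part1_check (string : String) (out : Bool) : Prop := out = part1_check_alt string
instance (string : String) (out : Bool) : Decidable (Spec_part1_check string out) := by unfold Spec_part1_check; infer_instance

-- ===== CLAIM (what is proved, stated in full; the proofs are below) =====
def Claim_equal_part1_check : Prop := ∀ (string : String), Dom_part1_check string → Pre_part1_check string → Spec_part1_check string (part1_check string)

-- ===== LEMMAS AND PROOFS =====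
-- A's loop split into its two stateless components (proof helpers only).
def part1_checkAll (l : List Char) : List Int → Bool
  | [] => true
  | i :: rest =>
    match PySem.List.pyGet? l i, PySem.List.pyGet? l (i + 1) with
    | some a, some b => if a ≤ b then part1_checkAll l rest else false
    | _, _ => false

def part1_checkAny (l : List Char) : List Int → Bool
  | [] => false
  | i :: rest =>
    match PySem.List.pyGet? l i, PySem.List.pyGet? l (i + 1) with
    | some a, some b => if a == b then true else part1_checkAny l rest
    | _, _ => false

theorem part1_checkLoop_eq (l : List Char) (L : List Int) :
    ∀ rep, part1_checkLoop l L rep = (part1_checkAll l L && (rep || part1_checkAny l L)) := by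
  induction L with
  | nil => intro rep; simp [part1_checkLoop, part1_checkAll, part1_checkAny]
  | cons i rest ih =>
    intro rep
    simp only [part1_checkLoop, part1_checkAll, part1_checkAny]
    rcases h1 : PySem.List.pyGet? l i with _ | a <;>
      rcases h2 : PySem.List.pyGet? l (i + 1) with _ | b <;> simp
    by_cases hab : a > b
    · simp [hab, not_le.mpr hab]
    · have hle : a ≤ b := not_lt.mp hab
      simp [hab, hle, ih, Bool.or_comm, Bool.or_left_comm]

-- sorted(w) == w names exactly the non-decreasing windows
theorem sorted_id_eq_iff (w : List Char) :
    PySem.List.sorted w (fun x => x) = w ↔ List.Pairwise (· ≤ ·) w := by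
  constructor
  · intro h; rw [← h]; exact PySem.List.sorted_pairwise w (fun x => x)
  · exact PySem.List.sorted_eq_self_of_pairwise w (fun x => x)

-- len(set(w)) < len(w) names exactly the windows with a duplicate
theorem setlen_lt_iff (w : List Char) :
    (PySem.Set.ofList w).length < w.length ↔ ¬ w.Nodup := by
  constructor
  · intro h hn
    rw [PySem.Set.ofList_eq_self_of_nodup w hn] at h
    exact lt_irrefl _ h
  · intro hn
    rcases lt_or_eq_of_le (PySem.Set.length_ofList_le w) with h | h
    · exact h
    · exfalso
      have hperm : (PySem.Set.ofList w).Perm w.dedup := by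
        rw [List.perm_ext_iff_of_nodup (PySem.Set.nodup_ofList w) (List.nodup_dedup w)]
        intro x; rw [PySem.Set.mem_ofList, List.mem_dedup]
      have hlen : w.dedup.length = w.length := by rw [← hperm.length_eq, h]
      exact hn (List.dedup_eq_self.mp ((List.dedup_sublist w).eq_of_length hlen))

-- in a non-decreasing window, a duplicate is the same thing as a non-strict adjacent step
theorem nodup_iff_pairwise_lt (w : List Char) (h : List.Pairwise (· ≤ ·) w) :
    w.Nodup ↔ List.Pairwise (· < ·) w := by
  constructor
  · intro hn; exact (h.and hn).imp (fun hp => lt_of_le_of_ne hp.1 hp.2)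
  · intro hlt; exact hlt.imp ne_of_lt

theorem checkAll_short (l : List Char) (h : l.length < 6) :
    part1_checkAll l [0, 1, 2, 3, 4] = false := by
  rcases l with _ | ⟨a, _ | ⟨b, _ | ⟨c, _ | ⟨d, _ | ⟨e, _ | ⟨f, t⟩⟩⟩⟩⟩⟩
  · rfl
  · rfl
  · show (if a ≤ b then part1_checkAll [a, b] [1, 2, 3, 4] else false) = false
    split_ifs <;> rfl
  · show (if a ≤ b then
        (if b ≤ c then part1_checkAll [a, b, c] [2, 3, 4] else false) else false) = false
    split_ifs <;> rfl
  · show (if a ≤ b then (if b ≤ c then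
        (if c ≤ d then part1_checkAll [a, b, c, d] [3, 4] else false) else false) else false) = false
    split_ifs <;> rfl
  · show (if a ≤ b then (if b ≤ c then (if c ≤ d then
        (if d ≤ e then part1_checkAll [a, b, c, d, e] [4] else false)
          else false) else false) else false) = false
    split_ifs <;> rfl
  · simp at h; omega

theorem pv_len_ge (t : List Char) : ∀ k : Int, k ≤ 5 → k ≤ (t.length : Int) + 1 + 1 + 1 + 1 + 1 := by
  intro k hk; have := Int.natCast_nonneg t.length; omega

theorem checkAll_long (a b c d e f : Char) (t : List Char) :
    part1_checkAll (a :: b :: c :: d :: e :: f :: t) [0, 1, 2, 3, 4] =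
      (decide (a ≤ b) && decide (b ≤ c) && decide (c ≤ d) && decide (d ≤ e) && decide (e ≤ f)) := by
  simp [part1_checkAll, PySem.List.pyGet?, PySem.List.pyIdx?, pv_len_ge t 0 (by norm_num),
    pv_len_ge t 2 (by norm_num), pv_len_ge t 3 (by norm_num), pv_len_ge t 4 (by norm_num),
    pv_len_ge t 5 (by norm_num),
    show (0:Int) ≤ (t.length : Int) + 1 + 1 + 1 + 1 by positivity, Bool.and_assoc]

theorem checkAny_long (a b c d e f : Char) (t : List Char) :
    part1_checkAny (a :: b :: c :: d :: e :: f :: t) [0, 1, 2, 3, 4] =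
      (decide (a = b) || decide (b = c) || decide (c = d) || decide (d = e) || decide (e = f)) := by
  simp [part1_checkAny, PySem.List.pyGet?, PySem.List.pyIdx?, pv_len_ge t 0 (by norm_num),
    pv_len_ge t 2 (by norm_num), pv_len_ge t 3 (by norm_num), pv_len_ge t 4 (by norm_num),
    pv_len_ge t 5 (by norm_num),
    show (0:Int) ≤ (t.length : Int) + 1 + 1 + 1 + 1 by positivity, Bool.or_assoc]

-- ===== VERDICT (by name: the statement is the Claim_ definition above) =====
theorem part1_check_spec : Claim_equal_part1_check := by
  intro s _ hpre
  unfold Pre_part1_check at hpre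
  unfold Spec_part1_check part1_check part1_check_alt
  rw [show PySem.List.pyRange 0 5 1 = [0, 1, 2, 3, 4] by decide, part1_checkLoop_eq,
    PySem.List.slice_to _ (by norm_num)]
  generalize s.toList = l at hpre ⊢
  by_cases h6 : 6 ≤ l.length
  · obtain ⟨a, b, c, d, e, f, t, rfl⟩ :
        ∃ a b c d e f t, l = a :: b :: c :: d :: e :: f :: t := by
      rcases l with _ | ⟨a, _ | ⟨b, _ | ⟨c, _ | ⟨d, _ | ⟨e, _ | ⟨f, t⟩⟩⟩⟩⟩⟩ <;> simp at h6 <;>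
        exact ⟨a, b, c, d, e, f, t, rfl⟩
    have hw : List.take (Int.toNat 6) (a :: b :: c :: d :: e :: f :: t) = [a, b, c, d, e, f] := by
      rfl
    rw [hw, checkAll_long, checkAny_long]
    by_cases hp : List.Pairwise (· ≤ ·) ([a, b, c, d, e, f] : List Char)
    · have hs : PySem.List.sorted [a, b, c, d, e, f] (fun x => x) = [a, b, c, d, e, f] :=
        (sorted_id_eq_iff _).mpr hp
      simp only [List.pairwise_cons, List.mem_cons] at hp
      have hab : a ≤ b := hp.1 b (by tauto)
      have hbc : b ≤ c := hp.2.1 c (by tauto)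
      have hcd : c ≤ d := hp.2.2.1 d (by tauto)
      have hde : d ≤ e := hp.2.2.2.1 e (by tauto)
      have hef : e ≤ f := hp.2.2.2.2.1 f (by tauto)
      have hch : List.Pairwise (· ≤ ·) ([a, b, c, d, e, f] : List Char) := by
        rw [← sorted_id_eq_iff]; exact hs
      have hnod : ((PySem.Set.ofList [a, b, c, d, e, f]).length <
          ([a, b, c, d, e, f] : List Char).length) ↔ (a = b ∨ b = c ∨ c = d ∨ d = e ∨ e = f) := by
        rw [setlen_lt_iff, nodup_iff_pairwise_lt _ hch, ← List.isChain_iff_pairwise]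
        simp only [List.isChain_cons_cons, List.isChain_singleton, and_true]
        constructor
        · intro h
          by_contra hne
          push Not at hne
          exact h ⟨lt_of_le_of_ne hab hne.1, lt_of_le_of_ne hbc hne.2.1,
            lt_of_le_of_ne hcd hne.2.2.1, lt_of_le_of_ne hde hne.2.2.2.1,
            lt_of_le_of_ne hef hne.2.2.2.2⟩
        · rintro (rfl | rfl | rfl | rfl | rfl) ⟨h1, h2, h3, h4, h5⟩
          · exact lt_irrefl _ h1
          · exact lt_irrefl _ h2
          · exact lt_irrefl _ h3
          · exact lt_irrefl _ h4
          · exact lt_irrefl _ h5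
      have hnod6 : (List.length (PySem.Set.ofList [a, b, c, d, e, f]) < 6) ↔
          (a = b ∨ b = c ∨ c = d ∨ d = e ∨ e = f) := by simpa using hnod
      simp [hs, hab, hbc, hcd, hde, hef, hnod6, Bool.or_assoc]
    · have hs : PySem.List.sorted [a, b, c, d, e, f] (fun x => x) ≠ [a, b, c, d, e, f] :=
        fun h => hp ((sorted_id_eq_iff _).mp h)
      have hconj : ¬ (a ≤ b ∧ b ≤ c ∧ c ≤ d ∧ d ≤ e ∧ e ≤ f) := by
        intro hc
        apply hp
        rw [← List.isChain_iff_pairwise]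
        simp only [List.isChain_cons_cons, List.isChain_singleton, and_true]
        exact hc
      by_cases h1 : a ≤ b <;> by_cases h2 : b ≤ c <;> by_cases h3 : c ≤ d <;>
        by_cases h4 : d ≤ e <;> by_cases h5 : e ≤ f <;> simp [h1, h2, h3, h4, h5] <;> tauto
  · have hlt : l.length < 6 := by omega
    have hw : List.take (Int.toNat 6) l = l := List.take_of_length_le (by omega)
    have hnc : ¬ List.IsChain (· ≤ ·) l := by
      rcases hpre with h | h
      · exact absurd h h6
      · exact h
    have hs : PySem.List.sorted l (fun x => x) ≠ l := fun h =>
      hnc (List.isChain_iff_pairwise.mpr ((sorted_id_eq_iff l).mp h))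
    rw [hw, checkAll_short l hlt]
    simp [hs]
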